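-- pv_equiv track=rewrite | github.com/tsuru7/algorithm-study | AtCoder/RECOMM/2022/09/12/B.py | solve
-- ===== SOURCE A (Python) =====
-- def solve(n,a):
--     a.sort(reverse=True)
--     # case1
--     # p1 - 2p2 + 2p3 - 2p4 ...
--     plus = True
--     p1 = 1
--     m1 = 0
--     p2 = 0
--     m2 = 0
--     for i in range(1, n-1):
--         plus = not plus
--         if plus:
--             p2 += 1
--         else:
--             m2 += 1
--     plus = not plus
--     if plus:
--         p1 += 1
--     else:
--         m1 += 1
--     ans1 = 0
--     for i in range(p2):
--         ans1 += 2*a[i]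
--     for i in range(p2, p2+p1):
--         ans1 += a[i]
--     for i in range(m2):
--         ans1 -= 2*a[-(i+1)]
--     for i in range(m2, m2+m1):
--         ans1 -= a[-(i+1)]
--
--     # case2
--     # -p1 + 2p2 - 2p3 + 2p4 ...
--     plus = False
--     p1 = 0
--     m1 = 1
--     p2 = 0
--     m2 = 0
--     for i in range(1, n-1):
--         plus = not plus
--         if plus:
--             p2 += 1
--         else:
--             m2 += 1
--     plus = not plus
--     if plus:
--         p1 += 1
--     else:
--         m1 += 1
--     ans2 = 0
--     for i in range(p2):
--         ans2 += 2*a[i]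
--     for i in range(p2, p2+p1):
--         ans2 += a[i]
--     for i in range(m2):
--         ans2 -= 2*a[-(i+1)]
--     for i in range(m2, m2+m1):
--         ans2 -= a[-(i+1)]
--
--     return max(ans1, ans2)
-- ===== SOURCE B (Python) =====
-- def solve(n, a):
--     # Selection-based: no sorting at all.  The answer only needs the sums of the
--     # top-t and bottom-t elements for a few closed-form counts t, which are
--     # computed by a quickselect-style partition recursion (average O(n)).
--     k = n - 2 if n > 2 else 0
--     h, odd = divmod(k, 2)
--
--     def topsum(xs, t):
--         # sum of the t largest elements of xs (with multiplicity)
--         if t <= 0: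
--             return 0
--         p = xs[len(xs) // 2]
--         big = [x for x in xs if x > p]
--         if t <= len(big):
--             return topsum(big, t)
--         eq = [x for x in xs if x == p]
--         if t <= len(big) + len(eq):
--             return sum(big) + p * (t - len(big))
--         small = [x for x in xs if x < p]
--         return sum(big) + p * len(eq) + topsum(small, t - len(big) - len(eq))
--
--     def botsum(xs, t):
--         # sum of the t smallest elements of xs
--         return -topsum([-x for x in xs], t)
--
--     case1 = topsum(a, h) + topsum(a, h + 1 + odd) - botsum(a, h + odd) - botsum(a, h + 1)
--     case2 = topsum(a, h + odd) + topsum(a, h + 1) - botsum(a, h) - botsum(a, h + 1 + odd)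
--     return max(case1, case2)
-- ===== Notes on version B (the rewrite author's own statement) =====
-- stated objective: alternative
-- what changed: B never sorts: it derives the coefficient counts in closed form and obtains the needed top-t/bottom-t partial sums by a quickselect-style three-way-partition recursion (bottom sums via negation), replacing A's full sort plus toggle-counting and four index loops.
import Mathlib
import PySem

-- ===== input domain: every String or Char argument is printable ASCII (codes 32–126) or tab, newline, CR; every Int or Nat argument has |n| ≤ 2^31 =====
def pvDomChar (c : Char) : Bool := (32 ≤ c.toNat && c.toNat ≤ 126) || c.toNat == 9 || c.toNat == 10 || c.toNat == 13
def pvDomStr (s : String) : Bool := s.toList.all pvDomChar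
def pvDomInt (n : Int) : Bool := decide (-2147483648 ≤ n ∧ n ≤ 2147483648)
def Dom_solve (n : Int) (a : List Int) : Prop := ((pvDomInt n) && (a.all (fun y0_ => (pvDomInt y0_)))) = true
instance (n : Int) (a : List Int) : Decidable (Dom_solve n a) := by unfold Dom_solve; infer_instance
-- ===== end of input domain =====

-- B replaces A's full sort + toggle loop + four index loops by closed-form counts and a
-- quickselect-style three-way-partition recursion computing the needed top-t/bottom-t sums
-- (objective: alternative). A sorts the argument list in place, B does not mutate it; the
-- equivalence proved is about the return value only.

-- ===== PORT A =====
def solve (n : Int) (a : List Int) : Int :=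
  let s := PySem.List.sorted a (fun x => x) true
  -- case1
  let st1 := (PySem.List.pyRange 1 (n - 1) 1).foldl
    (fun (st : Bool × Int × Int) _i =>
      let plus := !st.1
      if plus then (plus, st.2.1 + 1, st.2.2) else (plus, st.2.1, st.2.2 + 1))
    (true, 0, 0)
  let plus := !st1.1
  let p2 := st1.2.1
  let m2 := st1.2.2
  let p1 : Int := 1
  let m1 : Int := 0
  let pm := if plus then (p1 + 1, m1) else (p1, m1 + 1)
  let p1 := pm.1
  let m1 := pm.2
  let ans1 := (PySem.List.pyRange 0 p2 1).foldl
    (fun acc i => acc + 2 * PySem.List.pyGetD s i 0) 0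
  let ans1 := (PySem.List.pyRange p2 (p2 + p1) 1).foldl
    (fun acc i => acc + PySem.List.pyGetD s i 0) ans1
  let ans1 := (PySem.List.pyRange 0 m2 1).foldl
    (fun acc i => acc - 2 * PySem.List.pyGetD s (-(i + 1)) 0) ans1
  let ans1 := (PySem.List.pyRange m2 (m2 + m1) 1).foldl
    (fun acc i => acc - PySem.List.pyGetD s (-(i + 1)) 0) ans1
  -- case2
  let st2 := (PySem.List.pyRange 1 (n - 1) 1).foldl
    (fun (st : Bool × Int × Int) _i =>
      let plus := !st.1
      if plus then (plus, st.2.1 + 1, st.2.2) else (plus, st.2.1, st.2.2 + 1))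
    (false, 0, 0)
  let plus := !st2.1
  let p2 := st2.2.1
  let m2 := st2.2.2
  let p1 : Int := 0
  let m1 : Int := 1
  let pm := if plus then (p1 + 1, m1) else (p1, m1 + 1)
  let p1 := pm.1
  let m1 := pm.2
  let ans2 := (PySem.List.pyRange 0 p2 1).foldl
    (fun acc i => acc + 2 * PySem.List.pyGetD s i 0) 0
  let ans2 := (PySem.List.pyRange p2 (p2 + p1) 1).foldl
    (fun acc i => acc + PySem.List.pyGetD s i 0) ans2
  let ans2 := (PySem.List.pyRange 0 m2 1).foldl
    (fun acc i => acc - 2 * PySem.List.pyGetD s (-(i + 1)) 0) ans2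
  let ans2 := (PySem.List.pyRange m2 (m2 + m1) 1).foldl
    (fun acc i => acc - PySem.List.pyGetD s (-(i + 1)) 0) ans2
  max ans1 ans2

-- ===== PORT B =====
-- termination helpers for topsum: the pivot is a member and never passes a filter it fails
lemma pvPivotMem (xs : List Int) (hne : xs ≠ []) :
    PySem.List.pyGetD xs ((xs.length : Int) / 2) 0 ∈ xs := by
  have hlen : 0 < xs.length := List.length_pos_iff.mpr hne
  rw [PySem.List.pyGetD_eq_getElem xs 0 (by positivity) (by omega)]
  exact List.getElem_mem _

lemma pvFilterPivotLt (xs : List Int) (q : Int → Bool) (p : Int)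
    (hp : p ∈ xs) (hq : q p = false) : (xs.filter q).length < xs.length :=
  List.length_filter_lt_length_iff_exists.mpr ⟨p, hp, by simp [hq]⟩

-- sum of the t largest elements of xs, by quickselect-style three-way partition
-- (the Lean `xs = []` branch is a totality guard: there the Python raises IndexError,
-- which Pre_solve excludes)
def topsum (xs : List Int) (t : Int) : Int :=
  if t ≤ 0 then 0
  else if hne : xs = [] then 0
  else
    -- len(xs)//2 : dividend is a nonnegative length, so Lean's `/` coincides with Python's //
    let p := PySem.List.pyGetD xs ((xs.length : Int) / 2) 0
    let big := xs.filter fun x => decide (p < x)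
    if t ≤ (big.length : Int) then
      topsum big t
    else
      let eqs := xs.filter fun x => decide (x = p)
      if t ≤ (big.length : Int) + (eqs.length : Int) then
        big.sum + p * (t - (big.length : Int))
      else
        let small := xs.filter fun x => decide (x < p)
        big.sum + p * (eqs.length : Int) + topsum small (t - (big.length : Int) - (eqs.length : Int))
termination_by xs.length
decreasing_by
  · have he : (List.filter (fun x : {y // y ∈ xs} =>
        decide (PySem.List.pyGetD xs ((xs.length : Int) / 2) 0 < ↑x)) xs.attach).unattach
        = xs.filter fun x => decide (PySem.List.pyGetD xs ((xs.length : Int) / 2) 0 < x) := by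
      rw [List.unattach_filter
        (g := fun x => decide (PySem.List.pyGetD xs ((xs.length : Int) / 2) 0 < x))
        (hf := fun x h => rfl), List.unattach_attach]
    rw [he]
    exact pvFilterPivotLt xs _ _ (pvPivotMem xs hne) (by simp)
  · have he : (List.filter (fun x : {y // y ∈ xs} =>
        decide (↑x < PySem.List.pyGetD xs ((xs.length : Int) / 2) 0)) xs.attach).unattach
        = xs.filter fun x => decide (x < PySem.List.pyGetD xs ((xs.length : Int) / 2) 0) := by
      rw [List.unattach_filter
        (g := fun x => decide (x < PySem.List.pyGetD xs ((xs.length : Int) / 2) 0))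
        (hf := fun x h => rfl), List.unattach_attach]
    rw [he]
    exact pvFilterPivotLt xs _ _ (pvPivotMem xs hne) (by simp)

def solve_alt (n : Int) (a : List Int) : Int :=
  let k : Int := if n > 2 then n - 2 else 0
  let h := PySem.Int.floordiv k 2
  let odd := PySem.Int.mod k 2
  let botsum : List Int → Int → Int := fun xs t => -(topsum (xs.map fun x => -x) t)
  let case1 := topsum a h + topsum a (h + 1 + odd) - botsum a (h + odd) - botsum a (h + 1)
  let case2 := topsum a (h + odd) + topsum a (h + 1) - botsum a h - botsum a (h + 1 + odd)
  max case1 case2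

-- ===== PRECONDITION & SPEC =====
-- Pre_solve is exactly the inputs on which A returns (no IndexError): the list must reach the
-- largest index either case touches, namely ceil(k/2)+1 with k = max(0, n-2).
def Pre_solve (n : Int) (a : List Int) : Prop :=
  ((if n > 2 then n - 2 else 0) + 1) / 2 + 1 ≤ (a.length : Int)
instance (n : Int) (a : List Int) : Decidable (Pre_solve n a) := by unfold Pre_solve; infer_instance

def pvWitness_solve : Int × List Int := (4, [3, 1, 2, 0])

def Spec_solve (n : Int) (a : List Int) (out : Int) : Prop := out = solve_alt n a
instance (n : Int) (a : List Int) (out : Int) : Decidable (Spec_solve n a out) := by unfold Spec_solve; infer_instance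

-- ===== CLAIM (what is proved, stated in full; the proofs are below) =====
def Claim_equal_solve : Prop := ∀ (n : Int) (a : List Int), Dom_solve n a → Pre_solve n a → Spec_solve n a (solve n a)

-- ===== LEMMAS AND PROOFS =====

-- A's toggle loop in closed form: only the length of the range matters.
lemma toggle_fold (l : List Int) (plus : Bool) (p2 m2 : Int) :
    l.foldl
      (fun (st : Bool × Int × Int) _i =>
        let pl := !st.1
        if pl then (pl, st.2.1 + 1, st.2.2) else (pl, st.2.1, st.2.2 + 1))
      (plus, p2, m2)
    = ((if l.length % 2 = 0 then plus else !plus),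
       p2 + (if plus then ((l.length / 2 : Nat) : Int) else (((l.length + 1) / 2 : Nat) : Int)),
       m2 + (if plus then (((l.length + 1) / 2 : Nat) : Int) else ((l.length / 2 : Nat) : Int))) := by
  induction l generalizing plus p2 m2 with
  | nil => simp
  | cons x t ih =>
    cases plus <;>
      · rw [List.foldl_cons]
        simp only []
        rw [ih]
        rcases Nat.mod_two_eq_zero_or_one t.length with h | h <;>
          refine Prod.ext ?_ (Prod.ext ?_ ?_) <;>
            simp [h, Nat.add_mod] <;> omega

-- forward summation loop: sum over s[i], i ∈ [a, b), as a drop/take slice sum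
lemma front_fold (s : List Int) (coef : Int) (a b c : Int)
    (h0 : 0 ≤ a) (hab : a ≤ b) (hb : b ≤ (s.length : Int)) :
    (PySem.List.pyRange a b 1).foldl (fun acc i => acc + coef * PySem.List.pyGetD s i 0) c
      = c + coef * ((s.drop a.toNat).take (b - a).toNat).sum := by
  obtain ⟨t, ht⟩ : ∃ t : Nat, b = a + t := ⟨(b - a).toNat, by omega⟩
  subst ht
  induction t with
  | zero => simp
  | succ t ih =>
    have hb' : a + (t : Int) ≤ (s.length : Int) := by push_cast at hb; omega
    rw [show a + ((t + 1 : Nat) : Int) = (a + (t : Nat)) + 1 by push_cast; ring]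
    rw [PySem.List.pyRange_one_succ_right (by omega), List.foldl_append]
    rw [ih (by omega) hb']
    simp only [List.foldl_cons, List.foldl_nil]
    have hidx : (0 : Int) ≤ a + (t : Nat) := by omega
    have hidx2 : a + (t : Nat) < (s.length : Int) := by push_cast at hb; omega
    rw [PySem.List.pyGetD_eq_getElem s 0 hidx hidx2]
    have h1 : (a + ((t : Nat) : Int)).toNat = a.toNat + t := by omega
    have h2 : (a + ((t : Nat) : Int) - a).toNat = t := by omega
    have h3 : (a + ((t : Nat) : Int) + 1 - a).toNat = t + 1 := by omega
    simp only [h1, h2, h3]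
    have hlt : t < (s.drop a.toNat).length := by
      rw [List.length_drop]; omega
    rw [List.take_add_one, List.getElem?_eq_getElem hlt, List.getElem_drop]
    simp [List.sum_append]
    ring

-- backward summation loop: sum over s[-(i+1)], i ∈ [a, b), as a drop/take slice sum
lemma back_fold (s : List Int) (coef : Int) (a b c : Int)
    (h0 : 0 ≤ a) (hab : a ≤ b) (hb : b ≤ (s.length : Int)) :
    (PySem.List.pyRange a b 1).foldl (fun acc i => acc - coef * PySem.List.pyGetD s (-(i + 1)) 0) c
      = c - coef * ((s.drop (s.length - b.toNat)).take (b - a).toNat).sum := by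
  obtain ⟨t, ht⟩ : ∃ t : Nat, b = a + t := ⟨(b - a).toNat, by omega⟩
  subst ht
  induction t with
  | zero => simp
  | succ t ih =>
    have hb' : a + (t : Int) ≤ (s.length : Int) := by push_cast at hb; omega
    rw [show a + ((t + 1 : Nat) : Int) = (a + (t : Nat)) + 1 by push_cast; ring]
    rw [PySem.List.pyRange_one_succ_right (by omega), List.foldl_append]
    rw [ih (by omega) hb']
    simp only [List.foldl_cons, List.foldl_nil]
    have hk : (0 : Int) < ((a.toNat + t + 1 : Nat) : Int) := by push_cast; omega
    have hk2 : ((a.toNat + t + 1 : Nat) : Int) ≤ (s.length : Int) := by push_cast at hb ⊢; omega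
    have harg : -(a + ((t : Nat) : Int) + 1) = -((a.toNat + t + 1 : Nat) : Int) := by
      push_cast; omega
    rw [harg, PySem.List.pyGetD_neg_natCast s _ 0 (by exact_mod_cast hk) (by exact_mod_cast hk2)]
    have hblen : a.toNat + t + 1 ≤ s.length := by push_cast at hb; omega
    have h2 : (a + ((t : Nat) : Int) - a).toNat = t := by omega
    have h3 : (a + ((t : Nat) : Int) + 1 - a).toNat = t + 1 := by omega
    have h4 : (a + ((t : Nat) : Int)).toNat = a.toNat + t := by omega
    have h6 : (a + ((t : Nat) : Int) + 1).toNat = a.toNat + t + 1 := by omega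
    simp only [h2, h3, h4, h6]
    have hidx : s.length - (a.toNat + t + 1) < s.length := by omega
    rw [List.drop_eq_getElem_cons hidx]
    have h5 : s.length - (a.toNat + t + 1) + 1 = s.length - (a.toNat + t) := by omega
    rw [h5, List.take_succ_cons, List.sum_cons]
    ring

lemma front_fold1 (s : List Int) (a b c : Int)
    (h0 : 0 ≤ a) (hab : a ≤ b) (hb : b ≤ (s.length : Int)) :
    (PySem.List.pyRange a b 1).foldl (fun acc i => acc + PySem.List.pyGetD s i 0) c
      = c + ((s.drop a.toNat).take (b - a).toNat).sum := by
  have h := front_fold s 1 a b c h0 hab hb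
  simpa using h

lemma back_fold1 (s : List Int) (a b c : Int)
    (h0 : 0 ≤ a) (hab : a ≤ b) (hb : b ≤ (s.length : Int)) :
    (PySem.List.pyRange a b 1).foldl (fun acc i => acc - PySem.List.pyGetD s (-(i + 1)) 0) c
      = c - ((s.drop (s.length - b.toNat)).take (b - a).toNat).sum := by
  have h := back_fold s 1 a b c h0 hab hb
  simpa using h

-- one case of A, fully evaluated to drop/take slice sums
lemma case_val (s : List Int) (p2 p1 m2 m1 : Int)
    (hp2 : 0 ≤ p2) (hp1 : 0 ≤ p1) (hm2 : 0 ≤ m2) (hm1 : 0 ≤ m1)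
    (hf : p2 + p1 ≤ (s.length : Int)) (hbk : m2 + m1 ≤ (s.length : Int)) :
    (PySem.List.pyRange m2 (m2 + m1) 1).foldl
      (fun acc i => acc - PySem.List.pyGetD s (-(i + 1)) 0)
      ((PySem.List.pyRange 0 m2 1).foldl
        (fun acc i => acc - 2 * PySem.List.pyGetD s (-(i + 1)) 0)
        ((PySem.List.pyRange p2 (p2 + p1) 1).foldl
          (fun acc i => acc + PySem.List.pyGetD s i 0)
          ((PySem.List.pyRange 0 p2 1).foldl
            (fun acc i => acc + 2 * PySem.List.pyGetD s i 0) 0)))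
    = 2 * (s.take p2.toNat).sum + ((s.drop p2.toNat).take p1.toNat).sum
      - 2 * ((s.drop (s.length - m2.toNat)).take m2.toNat).sum
      - ((s.drop (s.length - m2.toNat - m1.toNat)).take m1.toNat).sum := by
  rw [front_fold s 2 0 p2 0 le_rfl hp2 (by omega)]
  rw [front_fold1 s p2 (p2 + p1) _ hp2 (by omega) (by omega)]
  rw [back_fold s 2 0 m2 _ le_rfl hm2 (by omega)]
  rw [back_fold1 s m2 (m2 + m1) _ hm2 (by omega) (by omega)]
  have e1 : (p2 - 0).toNat = p2.toNat := by omega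
  have e2 : (p2 + p1 - p2).toNat = p1.toNat := by omega
  have e3 : (m2 - 0).toNat = m2.toNat := by omega
  have e4 : (m2 + m1 - m2).toNat = m1.toNat := by omega
  have e5 : (m2 + m1).toNat = m2.toNat + m1.toNat := by omega
  have e6 : s.length - (m2.toNat + m1.toNat) = s.length - m2.toNat - m1.toNat := by omega
  rw [e1, e2, e3, e4, e5, e6]
  simp [Int.toNat_zero]

lemma tri_perm (xs : List Int) (p : Int) :
    ((xs.filter fun x => decide (p < x)) ++ ((xs.filter fun x => decide (x = p))
      ++ (xs.filter fun x => decide (x < p)))).Perm xs := by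
  induction xs with
  | nil => simp
  | cons y ys ih =>
    simp only [List.filter_cons]
    rcases lt_trichotomy p y with h|h|h
    · rw [if_pos (by simpa using h), if_neg (by simp; omega), if_neg (by simp; omega)]
      exact ih.cons y
    · subst h
      rw [if_neg (by simp), if_pos (by simp), if_neg (by simp)]
      refine List.Perm.trans ?_ (ih.cons p)
      rw [List.cons_append]
      exact List.perm_middle
    · rw [if_neg (by simp; omega), if_neg (by simp; omega), if_pos (by simpa using h)]
      refine List.Perm.trans ?_ (ih.cons y)
      refine List.Perm.trans (List.Perm.append_left _ List.perm_middle) List.perm_middle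

lemma dsort_partition (xs : List Int) (p : Int) :
    PySem.List.sorted xs (fun x => x) true
      = PySem.List.sorted (xs.filter fun x => decide (p < x)) (fun x => x) true
        ++ ((xs.filter fun x => decide (x = p))
        ++ PySem.List.sorted (xs.filter fun x => decide (x < p)) (fun x => x) true) := by
  have hmemB : ∀ y ∈ PySem.List.sorted (xs.filter fun x => decide (p < x)) (fun x => x) true, p < y := by
    intro y hy
    have := (PySem.List.mem_sorted _ _ _ y).mp hy
    simpa using (List.mem_filter.mp this).2
  have hmemE : ∀ y ∈ (xs.filter fun x => decide (x = p)), y = p := by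
    intro y hy; simpa using (List.mem_filter.mp hy).2
  have hmemS : ∀ y ∈ PySem.List.sorted (xs.filter fun x => decide (x < p)) (fun x => x) true, y < p := by
    intro y hy
    have := (PySem.List.mem_sorted _ _ _ y).mp hy
    simpa using (List.mem_filter.mp this).2
  refine List.Perm.eq_of_pairwise (le := fun a b => b ≤ a)
    (fun a b _ _ h1 h2 => le_antisymm h2 h1) ?_ ?_ ?_
  · exact PySem.List.sorted_pairwise_rev ..
  · rw [List.pairwise_append]
    refine ⟨PySem.List.sorted_pairwise_rev .., ?_, ?_⟩
    · rw [List.pairwise_append]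
      refine ⟨?_, PySem.List.sorted_pairwise_rev .., ?_⟩
      · rw [List.eq_replicate_of_mem hmemE]
        simp [List.pairwise_replicate]
      · intro a ha b hb
        have := hmemE a ha; have := hmemS b hb; omega
    · intro a ha b hb
      have := hmemB a ha
      rcases List.mem_append.mp hb with hb | hb
      · have := hmemE b hb; omega
      · have := hmemS b hb; omega
  · refine List.Perm.trans (PySem.List.sorted_perm ..) ?_
    refine List.Perm.trans (tri_perm xs p).symm ?_
    exact List.Perm.append (PySem.List.sorted_perm ..).symm
      (List.Perm.append (List.Perm.refl _) (PySem.List.sorted_perm ..).symm)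

lemma topsum_spec_aux : ∀ (N : Nat) (xs : List Int) (t : Int), xs.length ≤ N → 0 ≤ t →
    t ≤ (xs.length : Int) →
    topsum xs t = ((PySem.List.sorted xs (fun x => x) true).take t.toNat).sum := by
  intro N
  induction N with
  | zero =>
    intro xs t hN h0 ht
    have hxs : xs = [] := List.length_eq_zero_iff.mp (by omega)
    have ht0 : t = 0 := by subst hxs; simp at ht; omega
    subst hxs; subst ht0
    simp [topsum]
  | succ N ih =>
    intro xs t hN h0 ht
    rw [topsum]
    by_cases ht0 : t ≤ 0
    · have : t = 0 := by omega
      subst this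
      simp
    · rw [if_neg ht0]
      by_cases hne : xs = []
      · exfalso; subst hne; simp at ht; omega
      · rw [dif_neg hne]
        simp only []
        set p := PySem.List.pyGetD xs ((xs.length : Int) / 2) 0 with hp
        set big := xs.filter (fun x => decide (p < x)) with hbig
        set eqs := xs.filter (fun x => decide (x = p)) with heqs
        set small := xs.filter (fun x => decide (x < p)) with hsmall
        have hmemE : ∀ y ∈ eqs, y = p := by
          intro y hy; simpa [heqs] using (List.mem_filter.mp hy).2
        have hlens : big.length + (eqs.length + small.length) = xs.length := by
          have h := (tri_perm xs p).length_eq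
          simpa using h
        have hbl : big.length < xs.length :=
          pvFilterPivotLt xs _ _ (pvPivotMem xs hne) (by simp [hp])
        have hsl : small.length < xs.length :=
          pvFilterPivotLt xs _ _ (pvPivotMem xs hne) (by simp [hp])
        have hdec := dsort_partition xs p
        rw [← hbig, ← heqs, ← hsmall] at hdec
        have hlB : (PySem.List.sorted big (fun x => x) true).length = big.length :=
          PySem.List.length_sorted ..
        have hlS : (PySem.List.sorted small (fun x => x) true).length = small.length :=
          PySem.List.length_sorted ..
        by_cases h1 : t ≤ (big.length : Int)
        · rw [if_pos h1, ih big t (by omega) h0 (by exact_mod_cast h1)]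
          rw [hdec, List.take_append_of_le_length (by omega)]
        · rw [if_neg h1]
          by_cases h2 : t ≤ (big.length : Int) + (eqs.length : Int)
          · rw [if_pos h2]
            rw [hdec, List.take_append, List.sum_append,
              List.take_of_length_le (by omega),
              List.take_append_of_le_length (by omega),
              (PySem.List.sorted_perm ..).sum_eq,
              List.eq_replicate_of_mem hmemE, List.take_replicate, List.sum_replicate,
              nsmul_eq_mul]
            have hmin : min (t.toNat - (PySem.List.sorted big (fun x => x) true).length)
                eqs.length = t.toNat - big.length := by omega
            rw [hmin]
            have hc : ((t.toNat - big.length : Nat) : Int) = t - (big.length : Int) := by omega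
            rw [hc]
            ring
          · rw [if_neg h2]
            have hlensZ : ((big.length : Int)) + (((eqs.length : Int)) + ((small.length : Int)))
                = (xs.length : Int) := by exact_mod_cast hlens
            have hsN : small.length ≤ N := by omega
            have h0' : (0:Int) ≤ t - ↑big.length - ↑eqs.length := by omega
            have ht' : t - ↑big.length - ↑eqs.length ≤ (small.length : Int) := by omega
            rw [ih small _ hsN h0' ht']
            rw [hdec, List.take_append, List.sum_append,
              List.take_of_length_le (show (PySem.List.sorted big (fun x => x) true).length ≤ t.toNat by omega),
              List.take_append, List.sum_append,
              List.take_of_length_le (show eqs.length ≤ t.toNat - (PySem.List.sorted big (fun x => x) true).length by omega),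
              (PySem.List.sorted_perm big (fun x => x) true).sum_eq]
            have heqsum : eqs.sum = ((eqs.length : Int)) * p := by
              rw [List.eq_replicate_of_mem hmemE]
              simp
            have hc' : (t - ↑big.length - ↑eqs.length).toNat
                = t.toNat - (PySem.List.sorted big (fun x => x) true).length - eqs.length := by
              omega
            rw [heqsum, hc']
            ring

lemma topsum_spec (xs : List Int) (t : Int) (h0 : 0 ≤ t) (ht : t ≤ (xs.length : Int)) :
    topsum xs t = ((PySem.List.sorted xs (fun x => x) true).take t.toNat).sum :=
  topsum_spec_aux xs.length xs t le_rfl h0 ht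

lemma pvSumNeg (l : List Int) : (l.map fun x => -x).sum = -l.sum := by
  induction l with
  | nil => simp
  | cons x t ih => simp [ih]; ring

lemma dsort_neg (xs : List Int) :
    PySem.List.sorted (xs.map fun x => -x) (fun x => x) true
      = ((PySem.List.sorted xs (fun x => x) true).map fun x => -x).reverse := by
  refine List.Perm.eq_of_pairwise (le := fun a b => b ≤ a)
    (fun a b _ _ h1 h2 => le_antisymm h2 h1) ?_ ?_ ?_
  · exact PySem.List.sorted_pairwise_rev ..
  · rw [List.pairwise_reverse, List.pairwise_map]
    exact List.Pairwise.imp (fun h => by omega) (PySem.List.sorted_pairwise_rev ..)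
  · refine ((PySem.List.sorted_perm ..).trans ?_).trans (List.reverse_perm _).symm
    exact List.Perm.map _ (PySem.List.sorted_perm xs (fun x => x) true).symm

lemma botsum_spec (xs : List Int) (t : Int) (h0 : 0 ≤ t) (ht : t ≤ (xs.length : Int)) :
    -(topsum (xs.map fun x => -x) t)
      = ((PySem.List.sorted xs (fun x => x) true).drop
          ((PySem.List.sorted xs (fun x => x) true).length - t.toNat)).sum := by
  have hlm : (xs.map fun x => -x).length = xs.length := List.length_map ..
  rw [topsum_spec _ t h0 (by rw [hlm]; exact ht), dsort_neg]
  have hlen : (PySem.List.sorted xs (fun x => x) true).length = xs.length :=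
    PySem.List.length_sorted ..
  have hmaplen : ((PySem.List.sorted xs (fun x => x) true).map fun x => -x).length = xs.length := by
    rw [List.length_map, hlen]
  rw [List.take_reverse, List.sum_reverse, hmaplen, ← List.map_drop, pvSumNeg, hlen]
  ring

lemma alt_case (a : List Int) (tx1 tx2 ty1 ty2 p2 p1 m2 m1 : Int)
    (hx1 : tx1 = p2) (hx2 : tx2 = p2 + p1) (hy1 : ty1 = m2) (hy2 : ty2 = m2 + m1)
    (hp2 : 0 ≤ p2) (hp1 : 0 ≤ p1) (hm2 : 0 ≤ m2) (hm1 : 0 ≤ m1)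
    (hf : p2 + p1 ≤ (a.length : Int)) (hbk : m2 + m1 ≤ (a.length : Int)) :
    topsum a tx1 + topsum a tx2
      - -(topsum (a.map fun x => -x) ty1) - -(topsum (a.map fun x => -x) ty2)
    = 2 * ((PySem.List.sorted a (fun x => x) true).take p2.toNat).sum
      + (((PySem.List.sorted a (fun x => x) true).drop p2.toNat).take p1.toNat).sum
      - 2 * (((PySem.List.sorted a (fun x => x) true).drop
               ((PySem.List.sorted a (fun x => x) true).length - m2.toNat)).take m2.toNat).sum
      - (((PySem.List.sorted a (fun x => x) true).drop
           ((PySem.List.sorted a (fun x => x) true).length - m2.toNat - m1.toNat)).take m1.toNat).sum := by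
  rw [hx1, hx2, hy1, hy2]
  rw [topsum_spec a p2 hp2 (by omega), topsum_spec a (p2 + p1) (by omega) hf,
    botsum_spec a m2 hm2 (by omega), botsum_spec a (m2 + m1) (by omega) hbk]
  set s := PySem.List.sorted a (fun x => x) true with hs
  have hlen : s.length = a.length := PySem.List.length_sorted ..
  have e1 : (p2 + p1).toNat = p2.toNat + p1.toNat := by omega
  have e2 : s.length - (m2 + m1).toNat = s.length - m2.toNat - m1.toNat := by omega
  rw [e1, List.take_add, List.sum_append, e2]
  have hts : (s.drop (s.length - m2.toNat)).take m2.toNat = s.drop (s.length - m2.toNat) :=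
    List.take_of_length_le (by rw [List.length_drop]; omega)
  have hsplit : s.drop (s.length - m2.toNat - m1.toNat)
      = (s.drop (s.length - m2.toNat - m1.toNat)).take m1.toNat ++ s.drop (s.length - m2.toNat) := by
    have h := List.take_append_drop m1.toNat (s.drop (s.length - m2.toNat - m1.toNat))
    rw [List.drop_drop] at h
    have harith : s.length - m2.toNat - m1.toNat + m1.toNat = s.length - m2.toNat := by omega
    rw [harith] at h
    exact h.symm
  have hD2 : (s.drop (s.length - m2.toNat - m1.toNat)).sum
      = ((s.drop (s.length - m2.toNat - m1.toNat)).take m1.toNat).sum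
        + (s.drop (s.length - m2.toNat)).sum := by
    conv_lhs => rw [hsplit]
    rw [List.sum_append]
  rw [hts, hD2]
  ring

-- ===== VERDICT (by name: the statement is the Claim_ definition above) =====
theorem solve_spec : Claim_equal_solve := by
  intro n a _hdom hpre
  unfold Spec_solve solve solve_alt
  simp only [toggle_fold]
  set s := PySem.List.sorted a (fun x => x) true with hs
  have hlen : s.length = a.length := PySem.List.length_sorted a _ _
  set t : Nat := ((PySem.List.pyRange 1 (n - 1) 1).length) with htdef
  have ht : t = (n - 2).toNat := by
    rw [htdef, PySem.List.length_pyRange_one]; congr 1; omega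
  have hk : (if n > 2 then n - 2 else 0) = ((t : Nat) : Int) := by
    split <;> omega
  unfold Pre_solve at hpre
  rw [hk] at hpre ⊢
  have hfd : PySem.Int.floordiv ((t : Nat) : Int) 2 = ((t / 2 : Nat) : Int) := by
    exact_mod_cast PySem.Int.floordiv_natCast t 2
  have hmd : PySem.Int.mod ((t : Nat) : Int) 2 = ((t % 2 : Nat) : Int) := by
    exact_mod_cast PySem.Int.mod_natCast t 2
  rw [hfd, hmd]
  have hL : t / 2 + t % 2 + 1 ≤ a.length := by
    have h2 : ((t : Int) + 1) / 2 = (t / 2 : Nat) + (t % 2 : Nat) := by omega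
    omega
  rcases Nat.mod_two_eq_zero_or_one t with hpar | hpar
  · simp only [hpar, Bool.not_true, Bool.not_false, Bool.false_eq_true,
      if_false, if_true, zero_add, Nat.cast_zero, add_zero]
    have h2 : (t + 1) / 2 = t / 2 := by omega
    rw [h2]
    rw [case_val s (↑(t / 2)) 1 (↑(t / 2)) 1 (by omega) (by omega) (by omega) (by omega)
      (by omega) (by omega)]
    rw [alt_case a (↑(t / 2)) (↑(t / 2) + 1) (↑(t / 2)) (↑(t / 2) + 1) (↑(t / 2)) 1 (↑(t / 2)) 1
      rfl rfl rfl rfl (by omega) (by omega) (by omega) (by omega) (by omega) (by omega)]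
  · simp only [hpar, Bool.not_true, Bool.not_false, Bool.false_eq_true,
      if_false, if_true, zero_add, Nat.cast_one]
    have h2 : (t + 1) / 2 = t / 2 + 1 := by omega
    rw [h2]
    push_cast
    simp only [Bool.not_false, Bool.not_true, Bool.false_eq_true, if_true, if_false]
    rw [case_val s (↑t / 2) 2 (↑t / 2 + 1) 0 (by omega) (by omega) (by omega)
      (by omega) (by omega) (by omega)]
    rw [case_val s (↑t / 2 + 1) 0 (↑t / 2) 2 (by omega) (by omega) (by omega)
      (by omega) (by omega) (by omega)]
    rw [alt_case a (↑t / 2) (↑t / 2 + 1 + 1) (↑t / 2 + 1) (↑t / 2 + 1) (↑t / 2) 2 (↑t / 2 + 1) 0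
      rfl (by ring) rfl (by ring) (by omega) (by omega) (by omega) (by omega) (by omega) (by omega)]
    rw [alt_case a (↑t / 2 + 1) (↑t / 2 + 1) (↑t / 2) (↑t / 2 + 1 + 1) (↑t / 2 + 1) 0 (↑t / 2) 2
      rfl (by ring) rfl (by ring) (by omega) (by omega) (by omega) (by omega) (by omega) (by omega)]
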